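-- pv_equiv track=rewrite | github.com/Daw-Jeong/Algorithm | 프로그래머스/lv3/12938. 최고의 집합/최고의 집합.py | solution
-- ===== SOURCE A (Python) =====
-- def solution(n, s):
--     answer = []
--     if s < n:
--         return [-1]
--
--
--     while s != 0:
--         temp = s // n
--         answer.append(temp)
--         s -= temp
--         n -= 1
--
--     return answer
-- ===== SOURCE B (Python) =====
-- def solution(n, s):
--     if s < n:
--         return [-1]
--     if s == 0:
--         return []
--     q, r = divmod(s, n)
--     return [q] * (n - r) + [q + 1] * r
-- ===== Notes on version B (the rewrite author's own statement) =====
-- stated objective: simpler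
-- what changed: Replaces A's iterative s//n subtraction loop by a closed-form construction [q]*(n-r)+[q+1]*r from a single divmod(s,n).
import Mathlib
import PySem

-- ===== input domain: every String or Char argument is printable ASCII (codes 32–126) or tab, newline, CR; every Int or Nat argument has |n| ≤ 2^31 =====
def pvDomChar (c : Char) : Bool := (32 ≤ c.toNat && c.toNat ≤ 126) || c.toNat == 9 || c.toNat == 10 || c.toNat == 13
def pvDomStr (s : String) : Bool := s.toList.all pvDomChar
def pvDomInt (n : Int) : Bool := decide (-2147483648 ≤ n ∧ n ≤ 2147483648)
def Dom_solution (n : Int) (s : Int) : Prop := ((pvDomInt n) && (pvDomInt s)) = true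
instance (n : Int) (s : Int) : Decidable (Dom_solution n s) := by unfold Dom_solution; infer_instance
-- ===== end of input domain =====

-- B replaces A's iterative s//n subtraction loop with a closed-form [q]*(n-r)+[q+1]*r from one divmod; return values only (no mutation involved).

-- ===== PORT A =====
-- A's while loop; fuel n.toNat + 1 suffices on Pre_ (the loop runs exactly n times when 1 ≤ n ≤ s, and 0 times when s = 0).
def solutionLoopA : Nat → Int → Int → List Int → List Int
  | 0, _, _, acc => acc
  | fuel + 1, s, n, acc =>
    if s ≠ 0 then
      solutionLoopA fuel (s - PySem.Int.floordiv s n) (n - 1) (acc ++ [PySem.Int.floordiv s n])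
    else acc

def solution (n : Int) (s : Int) : List Int :=
  if s < n then [-1]
  else solutionLoopA (n.toNat + 1) s n []

-- ===== PORT B =====
def solution_alt (n : Int) (s : Int) : List Int :=
  if s < n then [-1]
  else if s = 0 then []
  else
    let q := PySem.Int.floordiv s n
    let r := PySem.Int.mod s n
    List.replicate (n - r).toNat q ++ List.replicate r.toNat (q + 1)

-- ===== PRECONDITION & SPEC =====
-- Pre_ excludes only inputs on which A never returns: n = 0 with s > 0 raises ZeroDivisionError,
-- and n < 0 with n ≤ s, s ≠ 0 loops forever; A returns a value exactly on Pre_.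
def Pre_solution (n : Int) (s : Int) : Prop := s < n ∨ s = 0 ∨ 1 ≤ n
instance (n : Int) (s : Int) : Decidable (Pre_solution n s) := by unfold Pre_solution; infer_instance
def pvWitness_solution : Int × Int := (3, 7)

def Spec_solution (n : Int) (s : Int) (out : List Int) : Prop := out = solution_alt n s
instance (n : Int) (s : Int) (out : List Int) : Decidable (Spec_solution n s out) := by unfold Spec_solution; infer_instance

-- ===== CLAIM (what is proved, stated in full; the proofs are below) =====
def Claim_equal_solution : Prop := ∀ (n : Int) (s : Int), Dom_solution n s → Pre_solution n s → Spec_solution n s (solution n s)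

-- ===== LEMMAS AND PROOFS =====

-- one unfolding of A's loop when s ≠ 0
lemma loopA_step (fuel : Nat) (s n : Int) (acc : List Int) (h : s ≠ 0) :
    solutionLoopA (fuel + 1) s n acc =
      solutionLoopA fuel (s - PySem.Int.floordiv s n) (n - 1) (acc ++ [PySem.Int.floordiv s n]) := by
  rw [solutionLoopA]
  simp [h]

-- On 1 ≤ m ≤ s the loop with fuel m+1 produces exactly the closed-form equal-as-possible list.
lemma loopA_closed : ∀ (m : Nat) (s : Int) (acc : List Int), 1 ≤ m → (m : Int) ≤ s →
    solutionLoopA (m + 1) s (m : Int) acc =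
      acc ++ (List.replicate ((m : Int) - s % (m : Int)).toNat (s / (m : Int))
        ++ List.replicate (s % (m : Int)).toNat (s / (m : Int) + 1)) := by
  intro m
  induction m with
  | zero => intro s acc h; omega
  | succ k ih =>
    intro s acc _ hs
    have hkpos : (0 : Int) < (k : Int) + 1 := by positivity
    have hcast : ((k + 1 : Nat) : Int) = (k : Int) + 1 := by push_cast; ring
    rw [hcast] at hs ⊢
    have hs0 : s ≠ 0 := by omega
    have hfd : PySem.Int.floordiv s ((k : Int) + 1) = s / ((k : Int) + 1) :=
      PySem.Int.floordiv_eq_ediv_of_pos hkpos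
    set q := s / ((k : Int) + 1) with hq
    set r := s % ((k : Int) + 1) with hr
    have hqr : ((k : Int) + 1) * q + r = s := by linarith [Int.emod_add_mul_ediv s ((k : Int) + 1)]
    have hr0 : 0 ≤ r := Int.emod_nonneg s (by omega)
    have hrk : r < (k : Int) + 1 := Int.emod_lt_of_pos s hkpos
    have hq1 : 1 ≤ q := by
      rw [hq, Int.le_ediv_iff_mul_le hkpos]; omega
    rw [loopA_step _ _ _ _ hs0, hfd,
        show ((k : Int) + 1) - 1 = (k : Int) by ring]
    rcases Nat.eq_zero_or_pos k with hk0 | hkpos'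
    · -- k = 0 : n was 1, the single final step
      subst hk0
      have hq' : q = s := by simp [hq]
      have hr' : r = 0 := by simp [hr]
      rw [hq', hr']
      norm_num [solutionLoopA, List.replicate]
    · -- k ≥ 1 : one step then the IH on (s - q, k)
      have hkne : ((k : Int)) ≠ 0 := by exact_mod_cast Nat.pos_iff_ne_zero.mp hkpos'
      have hsq : s - q = r + (k : Int) * q := by linarith [hqr]
      have hs' : (k : Int) ≤ s - q := by nlinarith [hqr, hq1, hr0]
      have hstep := ih (s - q) (acc ++ [q]) hkpos' hs'
      rw [hstep]
      rcases lt_or_eq_of_le (by omega : r ≤ (k : Int)) with hlt | heq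
      · -- r < k : quotient stays q, remainder stays r
        have hdiv : (s - q) / (k : Int) = q := by
          rw [hsq, Int.add_mul_ediv_left r q hkne, Int.ediv_eq_zero_of_lt hr0 hlt, zero_add]
        have hmod : (s - q) % (k : Int) = r := by
          rw [hsq, Int.add_mul_emod_self_left r (k : Int) q, Int.emod_eq_of_lt hr0 hlt]
        rw [hdiv, hmod,
            show ((k : Int) + 1 - r).toNat = ((k : Int) - r).toNat + 1 by omega,
            List.replicate_succ]
        simp [List.append_assoc]
      · -- r = k : quotient becomes q + 1, remainder 0
        have hsq' : s - q = 0 + (k : Int) * (q + 1) := by rw [← heq] at hsq; linarith [hsq]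
        have hdiv : (s - q) / (k : Int) = q + 1 := by
          rw [hsq', Int.add_mul_ediv_left 0 (q + 1) hkne, Int.zero_ediv, zero_add]
        have hmod : (s - q) % (k : Int) = 0 := by
          rw [hsq', Int.add_mul_emod_self_left 0 (k : Int) (q + 1), Int.zero_emod]
        rw [hdiv, hmod,
            show ((k : Int) + 1 - r).toNat = 1 by omega,
            show ((k : Int) - 0).toNat = r.toNat by omega]
        simp [List.append_assoc, List.replicate]

theorem solution_spec_aux : ∀ (n : Int) (s : Int), Pre_solution n s → solution n s = solution_alt n s := by
  intro n s hpre
  unfold solution solution_alt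
  by_cases hlt : s < n
  · simp [hlt]
  · simp only [hlt, if_false]
    by_cases hs0 : s = 0
    · subst hs0
      simp [solutionLoopA]
    · -- s ≠ 0 and ¬ s < n force 1 ≤ n by Pre_
      have hn1 : 1 ≤ n := by rcases hpre with h | h | h <;> omega
      have hns : n ≤ s := le_of_not_gt hlt
      have hm : ((n.toNat : Int)) = n := Int.toNat_of_nonneg (by omega)
      have hmain := loopA_closed n.toNat s [] (by omega) (by omega)
      rw [hm] at hmain
      rw [hmain]
      have hfd : PySem.Int.floordiv s n = s / n := PySem.Int.floordiv_eq_ediv_of_pos (by omega)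
      have hmd : PySem.Int.mod s n = s % n := PySem.Int.mod_eq_emod_of_pos (by omega)
      simp [hs0, hfd, hmd]

-- ===== VERDICT (by name: the statement is the Claim_ definition above) =====
theorem solution_spec : Claim_equal_solution := by
  intro n s _ hpre
  exact solution_spec_aux n s hpre
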